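-- pv_equiv track=rewrite | github.com/zbgzbg2007/Machine-Learning | Easy21/FA.py | StateToFeature
-- ===== SOURCE A (Python) =====
-- def StateToFeature(state, action):
--   '''
--   This function transform from state and action to a feature vector.
--   - Input:
--     - state: a pair of integers
--     - action: a string
--   - Output:
--     - feature: a binary list
--   '''
--   d, p = state
--   feature = [0 for i in range(36)]
--   a, b, c = list(), list(), 0
--   for i in range(3):
--     if 1+i*3 <= d and d <= 4+i*3:
--       a.append(i)
--
--   for i in range(6):
--     if 1+i*3 <= p and p <= 3*i+6:
--       b.append(i)
--
--   if action == 's':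
--     c = 0
--   else:
--     c = 1
--   for i in a:
--     for j in b:
--       feature[i*6+j+c*18] = 1
--   return feature
-- ===== SOURCE B (Python) =====
-- def StateToFeature(state, action):
--     d, p = state
--     c = 0 if action == 's' else 1
--     feature = []
--     for idx in range(36):
--         i = (idx % 18) // 6
--         j = idx % 6
--         hit = (idx // 18 == c) and (1 + 3*i <= d <= 4 + 3*i) and (1 + 3*j <= p <= 3*j + 6)
--         feature.append(1 if hit else 0)
--     return feature
-- ===== Notes on version B (the rewrite author's own statement) =====
-- stated objective: alternative
-- what changed: A builds active-tile index lists and scatters 1s into a zero vector with a double loop; B makes a single gather pass over the 36 output cells, decoding each cell index (c=idx//18, i=(idx%18)//6, j=idx%6) and testing the same interval/action predicates.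
import Mathlib
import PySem

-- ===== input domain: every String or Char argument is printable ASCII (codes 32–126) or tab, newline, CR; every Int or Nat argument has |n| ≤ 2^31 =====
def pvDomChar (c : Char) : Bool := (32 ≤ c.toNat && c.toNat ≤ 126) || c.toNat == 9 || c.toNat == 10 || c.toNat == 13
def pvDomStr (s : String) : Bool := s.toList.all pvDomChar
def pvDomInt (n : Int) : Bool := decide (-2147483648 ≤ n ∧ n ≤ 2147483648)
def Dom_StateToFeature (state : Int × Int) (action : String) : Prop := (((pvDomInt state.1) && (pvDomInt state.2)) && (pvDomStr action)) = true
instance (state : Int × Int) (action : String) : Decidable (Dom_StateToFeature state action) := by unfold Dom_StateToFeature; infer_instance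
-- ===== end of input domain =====

-- B replaces A's scatter (active-tile lists + double loop writing 1s into a zero vector) by a
-- single gather pass over the 36 output cells, decoding each cell index and testing the same
-- interval/action predicates (objective: alternative decomposition, same cost).

-- ===== PORT A =====
def StateToFeature (state : Int × Int) (action : String) : List Int :=
  let d := state.1
  let p := state.2
  let feature : List Int := (PySem.List.pyRange 0 36 1).map (fun _ => (0 : Int))
  let a : List Int := (PySem.List.pyRange 0 3 1).foldl
    (fun acc i => if 1 + i * 3 ≤ d ∧ d ≤ 4 + i * 3 then acc ++ [i] else acc) []
  let b : List Int := (PySem.List.pyRange 0 6 1).foldl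
    (fun acc i => if 1 + i * 3 ≤ p ∧ p ≤ 3 * i + 6 then acc ++ [i] else acc) []
  let c : Int := if action == "s" then 0 else 1
  -- feature[i*6+j+c*18] = 1 : the index is always in 0..35 here, so List.set is exact
  a.foldl (fun f i => b.foldl (fun f j => f.set (i * 6 + j + c * 18).toNat 1) f) feature

-- ===== PORT B =====
def StateToFeature_alt (state : Int × Int) (action : String) : List Int :=
  let d := state.1
  let p := state.2
  let c : Int := if action == "s" then 0 else 1
  -- i = (idx % 18) // 6, j = idx % 6, appended gather over idx in range(36)
  (PySem.List.pyRange 0 36 1).foldl (fun feature idx =>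
    feature ++ [if PySem.Int.floordiv idx 18 = c ∧
                   (1 + 3 * PySem.Int.floordiv (PySem.Int.mod idx 18) 6 ≤ d ∧
                     d ≤ 4 + 3 * PySem.Int.floordiv (PySem.Int.mod idx 18) 6) ∧
                   (1 + 3 * PySem.Int.mod idx 6 ≤ p ∧ p ≤ 3 * PySem.Int.mod idx 6 + 6)
                then (1 : Int) else 0]) []

-- ===== PRECONDITION & SPEC =====
def Spec_StateToFeature (state : Int × Int) (action : String) (out : List Int) : Prop := out = StateToFeature_alt state action
instance (state : Int × Int) (action : String) (out : List Int) : Decidable (Spec_StateToFeature state action out) := by unfold Spec_StateToFeature; infer_instance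

-- ===== CLAIM (what is proved, stated in full; the proofs are below) =====
def Claim_equal_StateToFeature : Prop := ∀ (state : Int × Int) (action : String), Dom_StateToFeature state action → Spec_StateToFeature state action (StateToFeature state action)

-- ===== LEMMAS AND PROOFS =====

-- A's filtering loops, in closed form
theorem foldl_filter_if (P : Int → Prop) [DecidablePred P] (l : List Int) (acc : List Int) :
    l.foldl (fun acc i => if P i then acc ++ [i] else acc) acc
      = acc ++ l.filter (fun i => decide (P i)) := by
  induction l generalizing acc with
  | nil => simp
  | cons x l ih =>
    simp only [List.foldl_cons, List.filter_cons]
    by_cases hx : P x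
    · rw [if_pos hx, ih]; simp [hx]
    · rw [if_neg hx, ih]; simp [hx]

-- the scatter's inner loop, pointwise: cell k becomes 1 iff some j ∈ b hits it
theorem inner_get (b : List Int) (f : List Int) (n : Int → Nat) (k : Nat) :
    ((b.foldl (fun f j => f.set (n j) 1) f)[k]? : Option Int)
      = if ∃ j ∈ b, n j = k ∧ k < f.length then some 1 else f[k]? := by
  induction b generalizing f with
  | nil => simp
  | cons x b ih =>
    simp only [List.foldl_cons]
    rw [ih]
    simp only [List.length_set, List.getElem?_set]
    by_cases hb : ∃ j ∈ b, n j = k ∧ k < f.length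
    · obtain ⟨j, hj, hjk⟩ := hb
      rw [if_pos ⟨j, hj, hjk⟩, if_pos ⟨j, List.mem_cons_of_mem x hj, hjk⟩]
    · rw [if_neg hb]
      by_cases hxk : n x = k
      · by_cases hkl : k < f.length
        · rw [if_pos hxk, if_pos (show n x < f.length by omega),
              if_pos ⟨x, List.mem_cons_self, hxk, hkl⟩]
        · rw [if_pos hxk, if_neg (show ¬ n x < f.length by omega),
              if_neg (by rintro ⟨j, hj, hjk, hkl'⟩; exact hkl hkl'),
              List.getElem?_eq_none (by omega)]
      · rw [if_neg hxk, if_neg (by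
          rintro ⟨j, hj, hjk, hkl⟩
          rcases List.mem_cons.mp hj with h | h
          · exact hxk (h ▸ hjk)
          · exact hb ⟨j, h, hjk, hkl⟩)]

-- the scatter preserves the vector's length
theorem scatter_len (b : List Int) (g : List Int) (n : Int → Nat) :
    (b.foldl (fun f j => f.set (n j) 1) g).length = g.length := by
  induction b generalizing g with
  | nil => rfl
  | cons y b ihb => simp only [List.foldl_cons]; rw [ihb]; simp

-- the whole scatter, pointwise
theorem outer_get (a b : List Int) (f : List Int) (m : Int → Int → Nat) (k : Nat) :
    ((a.foldl (fun f i => b.foldl (fun f j => f.set (m i j) 1) f) f)[k]? : Option Int)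
      = if ∃ i ∈ a, ∃ j ∈ b, m i j = k ∧ k < f.length then some 1 else f[k]? := by
  induction a generalizing f with
  | nil => simp
  | cons x a ih =>
    simp only [List.foldl_cons]
    rw [ih, scatter_len b f (fun j => m x j), inner_get]
    by_cases h1 : ∃ i ∈ a, ∃ j ∈ b, m i j = k ∧ k < f.length
    · obtain ⟨i, hi, hrest⟩ := h1
      rw [if_pos ⟨i, hi, hrest⟩, if_pos ⟨i, List.mem_cons_of_mem x hi, hrest⟩]
    · rw [if_neg h1]
      by_cases h2 : ∃ j ∈ b, m x j = k ∧ k < f.length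
      · obtain ⟨j, hj, hjk⟩ := h2
        rw [if_pos ⟨j, hj, hjk⟩, if_pos ⟨x, List.mem_cons_self, j, hj, hjk⟩]
      · rw [if_neg h2, if_neg (by
          rintro ⟨i, hi, hrest⟩
          rcases List.mem_cons.mp hi with h | h
          · exact h2 (h ▸ hrest)
          · exact h1 ⟨i, h, hrest⟩)]

-- B's gather, pointwise: ((range 36).map g)[k]? for k < 36
theorem getElem?_map_range36 (g : Int → Int) (k : Nat) (hk : k < 36) :
    ((PySem.List.pyRange 0 36 1).map g)[k]? = some (g (k : Int)) := by
  have h := PySem.List.getElem?_map_pyRange_zero g 36 k hk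
  simpa using h

-- the heart of the equivalence: scatter hit-condition ↔ gather decode-condition at cell k
theorem key_iff (d p c : Int) (k : Nat) (hk : k < 36) (hc : c = 0 ∨ c = 1) :
    (∃ i, ((i = 0 ∨ i = 1 ∨ i = 2) ∧ 1 + i * 3 ≤ d ∧ d ≤ 4 + i * 3) ∧
       ∃ j, ((j = 0 ∨ j = 1 ∨ j = 2 ∨ j = 3 ∨ j = 4 ∨ j = 5) ∧ 1 + j * 3 ≤ p ∧ p ≤ 3 * j + 6) ∧
         (i * 6 + j + c * 18).toNat = k ∧ k < 36)
    ↔ (PySem.Int.floordiv (k : Int) 18 = c ∧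
        (1 + 3 * PySem.Int.floordiv (PySem.Int.mod (k : Int) 18) 6 ≤ d ∧
          d ≤ 4 + 3 * PySem.Int.floordiv (PySem.Int.mod (k : Int) 18) 6) ∧
        1 + 3 * PySem.Int.mod (k : Int) 6 ≤ p ∧ p ≤ 3 * PySem.Int.mod (k : Int) 6 + 6) := by
  rw [show PySem.Int.mod (k : Int) 18 = (k : Int) % 18 from
        PySem.Int.mod_eq_emod_of_pos (by norm_num),
      show PySem.Int.mod (k : Int) 6 = (k : Int) % 6 from
        PySem.Int.mod_eq_emod_of_pos (by norm_num),
      show PySem.Int.floordiv (k : Int) 18 = (k : Int) / 18 from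
        PySem.Int.floordiv_eq_ediv_of_pos (by norm_num),
      show PySem.Int.floordiv ((k : Int) % 18) 6 = ((k : Int) % 18) / 6 from
        PySem.Int.floordiv_eq_ediv_of_pos (by norm_num)]
  constructor
  · rintro ⟨i, ⟨hi, hd1, hd2⟩, j, ⟨hj, hp1, hp2⟩, hk1, -⟩
    refine ⟨by omega, ⟨by omega, by omega⟩, by omega, by omega⟩
  · rintro ⟨h1, ⟨h2, h3⟩, h4, h5⟩
    refine ⟨((k : Int) % 18) / 6, ⟨by omega, by omega, by omega⟩,
            (k : Int) % 6, ⟨by omega, by omega, by omega⟩, by omega, hk⟩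

set_option maxHeartbeats 1000000 in
theorem StateToFeature_spec : Claim_equal_StateToFeature := by
  intro state action hDom
  clear hDom
  obtain ⟨d, p⟩ := state
  unfold Spec_StateToFeature StateToFeature StateToFeature_alt
  simp only
  by_cases hA : (action == "s") = true <;>
  · simp only [hA, if_true, Bool.false_eq_true, if_false]
    rw [foldl_filter_if, foldl_filter_if,
        PySem.List.foldl_append_singleton_eq_map,
        show (PySem.List.pyRange 0 36 1).map (fun _ => (0 : Int)) = List.replicate 36 0 from by decide,
        show PySem.List.pyRange 0 3 1 = [0, 1, 2] from by decide,
        show PySem.List.pyRange 0 6 1 = [0, 1, 2, 3, 4, 5] from by decide]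
    apply List.ext_getElem?
    intro k
    rw [outer_get]
    simp only [List.nil_append]
    by_cases hk : k < 36
    · rw [getElem?_map_range36 _ k hk, List.getElem?_replicate, if_pos hk]
      simp only [List.length_replicate]
      split_ifs with h1 h2 h3
      all_goals try rfl
      all_goals
        simp only [List.mem_filter, List.mem_cons, List.not_mem_nil, or_false,
          decide_eq_true_eq] at h1
      all_goals
        first
          | exact absurd ((key_iff d p 0 k hk (Or.inl rfl)).mp h1) h2
          | exact absurd ((key_iff d p 1 k hk (Or.inr rfl)).mp h1) h2
          | exact absurd ((key_iff d p 0 k hk (Or.inl rfl)).mpr h2) h1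
          | exact absurd ((key_iff d p 1 k hk (Or.inr rfl)).mpr h2) h1
          | exact absurd ((key_iff d p 0 k hk (Or.inl rfl)).mpr h3) h1
          | exact absurd ((key_iff d p 1 k hk (Or.inr rfl)).mpr h3) h1
    · rw [if_neg (by rintro ⟨i, _, j, _, _, hlt⟩; rw [List.length_replicate] at hlt; omega),
          List.getElem?_eq_none (by rw [List.length_replicate]; omega),
          List.getElem?_eq_none (by rw [List.length_map, PySem.List.length_pyRange_one]; omega)]
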